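-- pv_equiv track=rewrite | github.com/JerryWong93/Practise | Quiz_3_optimize.py | maximum_histogram_area
-- ===== SOURCE A (Python) =====
-- def maximum_histogram_area(l):
--     i = 0
--     area = 0
--     max_area = 0
--     stack = []
--     while i < len(l):
--         if len(stack) == 0 or l[i] >= l[stack[-1]]:
--             stack.append(i)
--             i += 1
--         else:
--             top = stack.pop()
--             if stack == []:
--                 if l[top] >= 2 and i >= 2:
--                     area = l[top] * i
--                 else:
--                     area = 0
--             else:
--                 if l[top] >= 2 and i-stack[-1]-1 >= 2:
--                     area = l[top] * (i-stack[-1]-1)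
--                 else:
--                     area = 0
--             if max_area < area:
--                 max_area = area
--
--     while len(stack) != 0:
--         top = stack.pop()
--         if stack == []:
--             if l[top] >= 2 and i >= 2:
--                 area = l[top] * i
--             else:
--                 area = 0
--         else:
--             if l[top] >= 2 and i - stack[-1] - 1 >= 2:
--                 area = l[top] * (i - stack[-1] - 1)
--             else:
--                 area = 0
--         if max_area < area:
--             max_area = area
--
--     return  max_area
-- ===== SOURCE B (Python) =====
-- def maximum_histogram_area(l):
--     n = len(l)
--     best = 0
--     for j in range(n):
--         left = j
--         while left > 0 and l[left - 1] >= l[j]: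
--             left -= 1
--         right = j
--         while right + 1 < n and l[right + 1] >= l[j]:
--             right += 1
--         width = right - left + 1
--         if l[j] >= 2 and width >= 2:
--             area = l[j] * width
--             if best < area:
--                 best = area
--     return best
-- ===== Notes on version B (the rewrite author's own statement) =====
-- stated objective: simpler
-- what changed: Replaces the single-pass index-stack sweep (two sequential while-loops popping and measuring widths against the stack) by a direct per-bar computation: for each bar scan left and right for the maximal contiguous span in which it is a minimum and keep the best thresholded area.
import Mathlib
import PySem

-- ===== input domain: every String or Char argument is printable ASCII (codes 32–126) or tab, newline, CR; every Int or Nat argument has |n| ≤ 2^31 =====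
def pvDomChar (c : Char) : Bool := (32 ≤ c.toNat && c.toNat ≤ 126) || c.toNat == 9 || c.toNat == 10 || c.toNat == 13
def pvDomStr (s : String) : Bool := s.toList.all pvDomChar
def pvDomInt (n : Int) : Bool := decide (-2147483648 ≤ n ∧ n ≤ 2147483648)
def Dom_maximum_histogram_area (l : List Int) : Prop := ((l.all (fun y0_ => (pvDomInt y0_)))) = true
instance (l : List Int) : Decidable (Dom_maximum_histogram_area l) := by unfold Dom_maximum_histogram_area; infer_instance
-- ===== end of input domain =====

-- B drops A's index stack: for each bar it scans left/right for the maximal span where the bar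
-- is a minimum and keeps the best thresholded area (simpler, stack-free; not faster).


-- ===== PORT A =====
-- the area computed when index `t` is popped with remaining stack `rest` (top first) at cursor `i`
def pvAreaA (l : List Int) (t : Nat) (rest : List Nat) (i : Nat) : Int :=
  match rest with
  | [] => if 2 ≤ l.getD t 0 ∧ 2 ≤ (i : Int) then l.getD t 0 * (i : Int) else 0
  | p :: _ => if 2 ≤ l.getD t 0 ∧ 2 ≤ (i : Int) - (p : Int) - 1 then l.getD t 0 * ((i : Int) - (p : Int) - 1) else 0

-- A's two sequential while-loops; the stack keeps its top at the head. Indices stay in range,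
-- so Python's l[...] is l.getD ... 0 exactly.
def pvLoopA (l : List Int) (i : Nat) (stack : List Nat) (maxA : Int) : Int :=
  if _h : i < l.length then
    match stack with
    | [] => pvLoopA l (i+1) [i] maxA
    | t :: rest =>
      if l.getD t 0 ≤ l.getD i 0 then
        pvLoopA l (i+1) (i :: t :: rest) maxA
      else
        pvLoopA l i rest (max maxA (pvAreaA l t rest i))
  else
    match stack with
    | [] => maxA
    | t :: rest => pvLoopA l i rest (max maxA (pvAreaA l t rest i))
termination_by 2 * (l.length - i) + stack.length
decreasing_by all_goals simp_all <;> omega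

def maximum_histogram_area (l : List Int) : Int := pvLoopA l 0 [] 0

-- ===== PORT B =====
-- `while left > 0 and l[left-1] >= l[j]: left -= 1`
def pvGoLeft (l : List Int) (hj : Int) : Nat → Nat
  | 0 => 0
  | k+1 => if hj ≤ l.getD k 0 then pvGoLeft l hj k else k+1

-- `while right + 1 < n and l[right+1] >= l[j]: right += 1`
def pvGoRight (l : List Int) (hj : Int) (r : Nat) : Nat :=
  if _h : r + 1 < l.length ∧ hj ≤ l.getD (r+1) 0 then pvGoRight l hj (r+1) else r
termination_by l.length - r

-- one iteration of B's for-loop body: the thresholded area of bar j over its maximal span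
def pvAreaB (l : List Int) (j : Nat) : Int :=
  if 2 ≤ l.getD j 0 ∧
      2 ≤ (pvGoRight l (l.getD j 0) j : Int) - (pvGoLeft l (l.getD j 0) j : Int) + 1 then
    l.getD j 0 * ((pvGoRight l (l.getD j 0) j : Int) - (pvGoLeft l (l.getD j 0) j : Int) + 1)
  else 0

def maximum_histogram_area_alt (l : List Int) : Int :=
  (List.range l.length).foldl (fun best j => max best (pvAreaB l j)) 0

-- ===== PRECONDITION & SPEC =====
def Spec_maximum_histogram_area (l : List Int) (out : Int) : Prop := out = maximum_histogram_area_alt l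
instance (l : List Int) (out : Int) : Decidable (Spec_maximum_histogram_area l out) := by unfold Spec_maximum_histogram_area; infer_instance

-- ===== CLAIM (what is proved, stated in full; the proofs are below) =====
def Claim_equal_maximum_histogram_area : Prop := ∀ (l : List Int), Dom_maximum_histogram_area l → Spec_maximum_histogram_area l (maximum_histogram_area l)

-- ===== LEMMAS AND PROOFS =====

-- characterisation of B's scans --------------------------------------------------------------

lemma pvGoLeft_le (l : List Int) (h : Int) : ∀ j, pvGoLeft l h j ≤ j := by
  intro j; induction j with
  | zero => simp [pvGoLeft]
  | succ k ih => simp only [pvGoLeft]; split <;> omega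

lemma pvGoLeft_cov (l : List Int) (h : Int) :
    ∀ j m, pvGoLeft l h j ≤ m → m < j → h ≤ l.getD m 0 := by
  intro j; induction j with
  | zero => omega
  | succ k ih =>
    intro m h1 h2
    by_cases hc : h ≤ l.getD k 0
    · simp only [pvGoLeft, if_pos hc] at h1
      rcases Nat.lt_or_ge m k with hm | hm
      · exact ih m h1 hm
      · have : m = k := by omega
        subst this; exact hc
    · simp only [pvGoLeft, if_neg hc] at h1; omega

lemma pvGoLeft_bd (l : List Int) (h : Int) (j : Nat) :
    pvGoLeft l h j = 0 ∨ l.getD (pvGoLeft l h j - 1) 0 < h := by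
  induction j with
  | zero => left; simp [pvGoLeft]
  | succ k ih =>
    by_cases hc : h ≤ l.getD k 0
    · simpa only [pvGoLeft, if_pos hc] using ih
    · right; simp only [pvGoLeft, if_neg hc]; simpa using not_le.mp hc

lemma pvGoLeft_unique (l : List Int) (h : Int) :
    ∀ j L, L ≤ j → (∀ m, L ≤ m → m < j → h ≤ l.getD m 0) →
      (L = 0 ∨ l.getD (L-1) 0 < h) → pvGoLeft l h j = L := by
  intro j; induction j with
  | zero =>
    intro L h1 _ _
    have : L = 0 := by omega
    subst this; rfl
  | succ k ih =>
    intro L h1 hcov hbd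
    by_cases hc : h ≤ l.getD k 0
    · simp only [pvGoLeft, if_pos hc]
      have hLk : L ≤ k := by
        by_contra hL
        have : L = k + 1 := by omega
        subst this
        rcases hbd with h0 | hlt
        · omega
        · rw [show k+1-1 = k from rfl] at hlt; omega
      exact ih L hLk (fun m hm hmk => hcov m hm (by omega)) hbd
    · simp only [pvGoLeft, if_neg hc]
      by_contra hne
      have : L ≤ k := by omega
      exact hc (hcov k this (by omega))

lemma pvGoRight_ge (l : List Int) (h : Int) (j : Nat) : j ≤ pvGoRight l h j := by
  fun_induction pvGoRight l h j with
  | case1 r hr ih => omega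
  | case2 r hr => omega

lemma pvGoRight_lt (l : List Int) (h : Int) (j : Nat) (hj : j < l.length) :
    pvGoRight l h j < l.length := by
  fun_induction pvGoRight l h j with
  | case1 r hr ih => exact ih hr.1
  | case2 r hr => exact hj

lemma pvGoRight_cov (l : List Int) (h : Int) (j : Nat) :
    ∀ m, j < m → m ≤ pvGoRight l h j → h ≤ l.getD m 0 := by
  fun_induction pvGoRight l h j with
  | case1 r hr ih =>
    intro m h1 h2
    rcases Nat.lt_or_ge (r+1) m with hm | hm
    · exact ih m hm h2
    · have : m = r + 1 := by omega
      subst this; exact hr.2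
  | case2 r hr =>
    intro m h1 h2; omega

lemma pvGoRight_bd (l : List Int) (h : Int) (j : Nat) :
    ¬ (pvGoRight l h j + 1 < l.length) ∨ l.getD (pvGoRight l h j + 1) 0 < h := by
  fun_induction pvGoRight l h j with
  | case1 r hr ih => exact ih
  | case2 r hr =>
    by_cases hc : r + 1 < l.length
    · right; by_contra hlt; exact hr ⟨hc, by omega⟩
    · left; exact hc

lemma pvGoRight_unique (l : List Int) (h : Int) :
    ∀ j R, j ≤ R → R < l.length → (∀ m, j < m → m ≤ R → h ≤ l.getD m 0) →
      (¬ (R + 1 < l.length) ∨ l.getD (R+1) 0 < h) → pvGoRight l h j = R := by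
  intro j
  fun_induction pvGoRight l h j with
  | case1 r hr ih =>
    intro R h1 h2 hcov hbd
    have hrR : r < R := by
      by_contra hR
      have : R = r := by omega
      subst this
      rcases hbd with h0 | hlt
      · exact h0 hr.1
      · exact absurd hr.2 (not_le.mpr hlt)
    exact ih R (by omega) h2 (fun m hm hmR => hcov m (by omega) hmR) hbd
  | case2 r hr =>
    intro R h1 h2 hcov hbd
    by_contra hne
    have hrR : r < R := by omega
    exact hr ⟨by omega, hcov (r+1) (by omega) (by omega)⟩

-- pvAreaB facts ------------------------------------------------------------------------------

-- two bars of equal height connected by a ≥-bridge have the same span, hence the same area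
lemma pvAreaB_congr (l : List Int) (s j : Nat) (hsj : s ≤ j) (hjn : j < l.length)
    (heq : l.getD s 0 = l.getD j 0)
    (hconn : ∀ m, s ≤ m → m ≤ j → l.getD j 0 ≤ l.getD m 0) :
    pvAreaB l s = pvAreaB l j := by
  have hL : pvGoLeft l (l.getD j 0) j = pvGoLeft l (l.getD j 0) s := by
    apply pvGoLeft_unique
    · exact le_trans (pvGoLeft_le l _ s) hsj
    · intro m h1 h2
      rcases Nat.lt_or_ge m s with hm | hm
      · exact pvGoLeft_cov l _ s m h1 hm
      · exact hconn m hm (by omega)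
    · exact pvGoLeft_bd l _ s
  have hR : pvGoRight l (l.getD j 0) s = pvGoRight l (l.getD j 0) j := by
    apply pvGoRight_unique
    · exact le_trans hsj (pvGoRight_ge l _ j)
    · exact pvGoRight_lt l _ j hjn
    · intro m h1 h2
      rcases Nat.lt_or_ge j m with hm | hm
      · exact pvGoRight_cov l _ j m hm h2
      · exact hconn m (by omega) hm
    · exact pvGoRight_bd l _ j
  unfold pvAreaB
  rw [heq, hL, hR]

-- fold-max facts about B's loop --------------------------------------------------------------

lemma pvFold_ge_init (l : List Int) :
    ∀ (xs : List Nat) (a : Int), a ≤ xs.foldl (fun b j => max b (pvAreaB l j)) a := by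
  intro xs; induction xs with
  | nil => intro a; simp
  | cons x xs ih => intro a; exact le_trans (le_max_left _ _) (ih _)

lemma pvFold_ge_mem (l : List Int) :
    ∀ (xs : List Nat) (a : Int) (j : Nat), j ∈ xs →
      pvAreaB l j ≤ xs.foldl (fun b j => max b (pvAreaB l j)) a := by
  intro xs; induction xs with
  | nil => intro a j h; simp at h
  | cons x xs ih =>
    intro a j h
    rcases List.mem_cons.mp h with h | h
    · subst h; exact le_trans (le_max_right _ _) (pvFold_ge_init l xs _)
    · exact ih _ j h

lemma pvFold_le (l : List Int) :
    ∀ (xs : List Nat) (a c : Int), a ≤ c → (∀ j ∈ xs, pvAreaB l j ≤ c) →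
      xs.foldl (fun b j => max b (pvAreaB l j)) a ≤ c := by
  intro xs; induction xs with
  | nil => intro a c h _; simpa using h
  | cons x xs ih =>
    intro a c h hall
    exact ih _ c (max_le h (hall x (by simp))) (fun j hj => hall j (by simp [hj]))

lemma pvAlt_nonneg (l : List Int) : 0 ≤ maximum_histogram_area_alt l :=
  pvFold_ge_init l _ 0

lemma pvAlt_ge (l : List Int) (j : Nat) (hj : j < l.length) :
    pvAreaB l j ≤ maximum_histogram_area_alt l :=
  pvFold_ge_mem l _ 0 j (List.mem_range.mpr hj)

lemma pvAlt_le (l : List Int) (c : Int) (h0 : 0 ≤ c)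
    (h : ∀ j, j < l.length → pvAreaB l j ≤ c) : maximum_histogram_area_alt l ≤ c :=
  pvFold_le l _ 0 c h0 (fun j hj => h j (List.mem_range.mp hj))

-- the stack invariant ------------------------------------------------------------------------

-- `StkAdj l t rest`: t with the stack below it (top first): below-neighbour p is smaller-or-equal
-- in height, everything strictly between is strictly taller than t; the bottom dominates its prefix.
def StkAdj (l : List Int) : Nat → List Nat → Prop
  | b, [] => ∀ m, m < b → l.getD b 0 < l.getD m 0
  | t, p :: rest => p < t ∧ l.getD p 0 ≤ l.getD t 0 ∧
      (∀ m, p < m → m < t → l.getD t 0 < l.getD m 0) ∧ StkAdj l p rest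

def StkInv (l : List Int) (i : Nat) (stack : List Nat) : Prop :=
  match stack with
  | [] => i < l.length → ∀ m, m < i → l.getD i 0 < l.getD m 0
  | t :: rest => t < i ∧ StkAdj l t rest ∧
      (∀ s ∈ t :: rest, ∀ m, s < m → m < i → l.getD s 0 ≤ l.getD m 0) ∧
      (i < l.length → ∀ m, t < m → m < i → l.getD i 0 < l.getD m 0)

def MaxInv (l : List Int) (i : Nat) (stack : List Nat) (maxA : Int) : Prop :=
  0 ≤ maxA ∧ maxA ≤ maximum_histogram_area_alt l ∧
  ∀ j, j < i → j ∉ stack →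
    pvAreaB l j ≤ maxA ∨
      ∃ s ∈ stack, s < j ∧ l.getD s 0 = l.getD j 0 ∧
        (∀ m, s < m → m ≤ j → l.getD j 0 ≤ l.getD m 0)

lemma stkAdj_mem (l : List Int) :
    ∀ (rest : List Nat) (t : Nat), StkAdj l t rest →
      ∀ s ∈ rest, s < t ∧ l.getD s 0 ≤ l.getD t 0 := by
  intro rest; induction rest with
  | nil => intro t _ s hs; simp at hs
  | cons p rest ih =>
    intro t hadj s hs
    obtain ⟨h1, h2, h3, h4⟩ := hadj
    rcases List.mem_cons.mp hs with h | h
    · subst h; exact ⟨h1, h2⟩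
    · obtain ⟨ha, hb⟩ := ih p h4 s h
      exact ⟨by omega, le_trans hb h2⟩

-- the popped bar's exact right edge
lemma pop_R (l : List Int) (t i : Nat) (hti : t < i) (hin : i ≤ l.length)
    (hcov : ∀ m, t < m → m < i → l.getD t 0 ≤ l.getD m 0)
    (hright : i = l.length ∨ l.getD i 0 < l.getD t 0) :
    pvGoRight l (l.getD t 0) t = i - 1 := by
  apply pvGoRight_unique
  · omega
  · omega
  · intro m h1 h2; exact hcov m h1 (by omega)
  · have : i - 1 + 1 = i := by omega
    rw [this]
    rcases hright with h | h
    · left; omega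
    · right; exact h

lemma pop_L_nil (l : List Int) (t : Nat) (hadj : StkAdj l t []) :
    pvGoLeft l (l.getD t 0) t = 0 := by
  apply pvGoLeft_unique
  · omega
  · intro m h1 h2; exact le_of_lt (hadj m h2)
  · left; rfl

lemma pop_L_lt (l : List Int) (t p : Nat) (rest : List Nat)
    (hadj : StkAdj l t (p :: rest)) (hp : l.getD p 0 < l.getD t 0) :
    pvGoLeft l (l.getD t 0) t = p + 1 := by
  obtain ⟨h1, h2, h3, _⟩ := hadj
  apply pvGoLeft_unique
  · omega
  · intro m hm1 hm2; exact le_of_lt (h3 m (by omega) hm2)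
  · right; simpa using hp

lemma pop_L_le (l : List Int) (t p : Nat) (rest : List Nat)
    (hadj : StkAdj l t (p :: rest)) (hp : l.getD p 0 = l.getD t 0) :
    pvGoLeft l (l.getD t 0) t ≤ p := by
  obtain ⟨h1, h2, h3, _⟩ := hadj
  by_contra hgt
  rcases pvGoLeft_bd l (l.getD t 0) t with h0 | hlt
  · omega
  have hle := pvGoLeft_le l (l.getD t 0) t
  have hcv : l.getD t 0 ≤ l.getD (pvGoLeft l (l.getD t 0) t - 1) 0 := by
    rcases Nat.lt_or_ge p (pvGoLeft l (l.getD t 0) t - 1) with hm | hm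
    · exact le_of_lt (h3 _ hm (by omega))
    · have : pvGoLeft l (l.getD t 0) t - 1 = p := by omega
      rw [this, hp]
  omega

lemma pop_area_eq_nil (l : List Int) (t i : Nat)
    (hti : t < i) (hin : i ≤ l.length)
    (hadj : StkAdj l t [])
    (hcov : ∀ m, t < m → m < i → l.getD t 0 ≤ l.getD m 0)
    (hright : i = l.length ∨ l.getD i 0 < l.getD t 0) :
    pvAreaA l t [] i = pvAreaB l t := by
  have hR := pop_R l t i hti hin hcov hright
  have hL := pop_L_nil l t hadj
  unfold pvAreaA pvAreaB
  rw [hR, hL]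
  have hw : ((i-1 : Nat) : Int) - ((0 : Nat) : Int) + 1 = (i : Int) := by
    simp; omega
  rw [hw]

lemma pop_area_eq_lt (l : List Int) (t i p : Nat) (rest : List Nat)
    (hti : t < i) (hin : i ≤ l.length)
    (hadj : StkAdj l t (p :: rest))
    (hp : l.getD p 0 < l.getD t 0)
    (hcov : ∀ m, t < m → m < i → l.getD t 0 ≤ l.getD m 0)
    (hright : i = l.length ∨ l.getD i 0 < l.getD t 0) :
    pvAreaA l t (p :: rest) i = pvAreaB l t := by
  have hR := pop_R l t i hti hin hcov hright
  have hL := pop_L_lt l t p rest hadj hp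
  have hpt : p < t := hadj.1
  unfold pvAreaA pvAreaB
  rw [hR, hL]
  have hw : ((i-1 : Nat) : Int) - ((p+1 : Nat) : Int) + 1 = (i : Int) - (p : Int) - 1 := by
    push_cast; omega
  rw [hw]

-- the area A records at a pop never exceeds, and in the decisive cases equals, B's area for t
lemma pop_area_le (l : List Int) (t i : Nat) (rest : List Nat)
    (hti : t < i) (hin : i ≤ l.length)
    (hadj : StkAdj l t rest)
    (hcov : ∀ m, t < m → m < i → l.getD t 0 ≤ l.getD m 0)
    (hright : i = l.length ∨ l.getD i 0 < l.getD t 0) :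
    pvAreaA l t rest i ≤ pvAreaB l t := by
  rcases rest with _ | ⟨p, rest'⟩
  · exact le_of_eq (pop_area_eq_nil l t i hti hin hadj hcov hright)
  ·
    by_cases hp : l.getD p 0 < l.getD t 0
    · exact le_of_eq (pop_area_eq_lt l t i p rest' hti hin hadj hp hcov hright)
    · have hpe : l.getD p 0 = l.getD t 0 := le_antisymm hadj.2.1 (not_lt.mp hp)
      have hR := pop_R l t i hti hin hcov hright
      have hL := pop_L_le l t p rest' hadj hpe
      have hL' := pvGoLeft_le l (l.getD t 0) t
      simp only [pvAreaA, pvAreaB]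
      rw [hR]
      split_ifs with h1 h2 h2
      · have hw : (i : Int) - (p : Int) - 1 ≤ ((i-1 : Nat) : Int) - ((pvGoLeft l (l.getD t 0) t : Nat) : Int) + 1 := by
          omega
        have h0 : (0:Int) ≤ l.getD t 0 := by have := h1.1; omega
        exact mul_le_mul_of_nonneg_left hw h0
      · exfalso
        apply h2
        refine ⟨h1.1, ?_⟩
        have := h1.2
        omega
      · have h0 : (0:Int) ≤ l.getD t 0 := by have := h2.1; omega
        have h2' := h2.2
        exact mul_nonneg h0 (by omega)
      · exact le_refl 0

-- a pop step preserves the stack invariant (both phases: hgi is only needed while i is in range)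
lemma pop_stkinv (l : List Int) (t i : Nat) (rest : List Nat)
    (hstk : StkInv l i (t :: rest))
    (hgi : i < l.length → l.getD i 0 < l.getD t 0) :
    StkInv l i rest := by
  obtain ⟨hti, hadj, hA4, hA7⟩ := hstk
  rcases rest with _ | ⟨p, rest'⟩
  · intro hn m hm
    rcases Nat.lt_trichotomy m t with hmt | hmt | hmt
    · exact lt_trans (hgi hn) (hadj m hmt)
    · subst hmt; exact hgi hn
    · exact hA7 hn m hmt hm
  · obtain ⟨hpt, hple, hbetw, hadj'⟩ := hadj
    refine ⟨by omega, hadj', ?_, ?_⟩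
    · intro s hs m hm1 hm2
      exact hA4 s (List.mem_cons_of_mem t hs) m hm1 hm2
    · intro hn m hm1 hm2
      rcases Nat.lt_trichotomy m t with hmt | hmt | hmt
      · exact lt_trans (hgi hn) (hbetw m hm1 hmt)
      · subst hmt; exact hgi hn
      · exact hA7 hn m hmt hm2

-- a pop step preserves the max invariant
lemma pop_maxinv (l : List Int) (t i : Nat) (rest : List Nat) (maxA : Int)
    (hin : i ≤ l.length)
    (hstk : StkInv l i (t :: rest))
    (hright : i = l.length ∨ l.getD i 0 < l.getD t 0)
    (hmax : MaxInv l i (t :: rest) maxA) :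
    MaxInv l i rest (max maxA (pvAreaA l t rest i)) := by
  obtain ⟨hti, hadj, hA4, _⟩ := hstk
  obtain ⟨hm0, hmub, hmdel⟩ := hmax
  have hcovt : ∀ m, t < m → m < i → l.getD t 0 ≤ l.getD m 0 :=
    fun m hm1 hm2 => hA4 t (List.mem_cons_self) m hm1 hm2
  have htn : t < l.length := by omega
  refine ⟨le_trans hm0 (le_max_left _ _), ?_, ?_⟩
  · exact max_le hmub (le_trans (pop_area_le l t i rest hti hin hadj hcovt hright) (pvAlt_ge l t htn))
  · intro j hj hjrest
    by_cases hjt : j = t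
    · subst hjt
      rcases rest with _ | ⟨p, rest'⟩
      · left
        rw [← pop_area_eq_nil l j i hti hin hadj hcovt hright]
        exact le_max_right _ _
      · by_cases hp : l.getD p 0 < l.getD j 0
        · left
          rw [← pop_area_eq_lt l j i p rest' hti hin hadj hp hcovt hright]
          exact le_max_right _ _
        · right
          have hpe : l.getD p 0 = l.getD j 0 := le_antisymm hadj.2.1 (not_lt.mp hp)
          refine ⟨p, List.mem_cons_self, hadj.1, hpe, ?_⟩
          intro m hm1 hm2
          rcases Nat.lt_or_ge m j with hmj | hmj
          · exact le_of_lt (hadj.2.2.1 m hm1 hmj)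
          · have : m = j := by omega
            subst this; exact le_refl _
    · have hjold : j ∉ t :: rest := by
        intro hmem
        rcases List.mem_cons.mp hmem with h | h
        · exact hjt h
        · exact hjrest h
      rcases hmdel j hj hjold with hle | ⟨s, hs, hsj, hse, hconn⟩
      · exact Or.inl (le_trans hle (le_max_left _ _))
      · by_cases hst : s = t
        · subst hst
          have hconn' : ∀ m, s ≤ m → m ≤ j → l.getD j 0 ≤ l.getD m 0 := by
            intro m hm1 hm2
            rcases Nat.eq_or_lt_of_le hm1 with he | hlt
            · rw [← he]; exact le_of_eq hse.symm
            · exact hconn m hlt hm2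
          rcases rest with _ | ⟨p, rest'⟩
          · left
            have hjn : j < l.length := by omega
            rw [← pvAreaB_congr l s j (le_of_lt hsj) hjn hse hconn',
                ← pop_area_eq_nil l s i hti hin hadj hcovt hright]
            exact le_max_right _ _
          · by_cases hp : l.getD p 0 < l.getD s 0
            · left
              have hjn : j < l.length := by omega
              rw [← pvAreaB_congr l s j (le_of_lt hsj) hjn hse hconn',
                  ← pop_area_eq_lt l s i p rest' hti hin hadj hp hcovt hright]
              exact le_max_right _ _
            · right
              have hpe : l.getD p 0 = l.getD s 0 := le_antisymm hadj.2.1 (not_lt.mp hp)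
              refine ⟨p, List.mem_cons_self, lt_trans hadj.1 hsj, by rw [hpe, hse], ?_⟩
              intro m hm1 hm2
              rcases Nat.lt_trichotomy m s with hms | hms | hms
              · rw [← hse]; exact le_of_lt (hadj.2.2.1 m hm1 hms)
              · subst hms; exact le_of_eq hse.symm
              · exact hconn m hms hm2
        · have hs' : s ∈ rest := by
            rcases List.mem_cons.mp hs with h | h
            · exact absurd h hst
            · exact h
          exact Or.inr ⟨s, hs', hsj, hse, hconn⟩

-- the main loop invariant
lemma pvLoopA_eq (l : List Int) (i : Nat) (stack : List Nat) (maxA : Int) :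
    i ≤ l.length → StkInv l i stack → MaxInv l i stack maxA →
    pvLoopA l i stack maxA = maximum_histogram_area_alt l := by
  fun_induction pvLoopA l i stack maxA with
  | case1 i maxA h ih =>
    intro hin hstk hmax
    apply ih (by omega)
    · refine ⟨by omega, fun m hm => hstk h m hm, ?_, ?_⟩
      · intro s hs m hm1 hm2
        rcases List.mem_cons.mp hs with he | hs'
        · omega
        · simp at hs'
      · intro _ m hm1 hm2; omega
    · obtain ⟨h0, hub, hdel⟩ := hmax
      refine ⟨h0, hub, ?_⟩
      intro j hj hjmem
      have hji : j < i := by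
        have : j ≠ i := fun he => hjmem (he ▸ List.mem_cons_self)
        omega
      rcases hdel j hji (by simp) with hle | ⟨s, hs, _⟩
      · exact Or.inl hle
      · simp at hs
  | case2 i maxA h t rest hc ih =>
    intro hin hstk hmax
    obtain ⟨hti, hadj, hA4, hA7⟩ := hstk
    apply ih (by omega)
    · refine ⟨by omega, ⟨hti, hc, fun m hm1 hm2 => hA7 h m hm1 hm2, hadj⟩, ?_, ?_⟩
      · intro s hs m hm1 hm2
        rcases List.mem_cons.mp hs with he | hs'
        · omega
        · rcases Nat.lt_or_ge m i with hmi | hmi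
          · exact hA4 s hs' m hm1 hmi
          · have hmeq : m = i := by omega
            subst hmeq
            rcases List.mem_cons.mp hs' with he | hs''
            · subst he; exact hc
            · exact le_trans (stkAdj_mem l rest t hadj s hs'').2 hc
      · intro _ m hm1 hm2; omega
    · obtain ⟨h0, hub, hdel⟩ := hmax
      refine ⟨h0, hub, ?_⟩
      intro j hj hjmem
      have hjmem' : j ∉ t :: rest := fun hm => hjmem (List.mem_cons_of_mem i hm)
      have hji : j < i := by
        have : j ≠ i := fun he => hjmem (he ▸ List.mem_cons_self)
        omega
      rcases hdel j hji hjmem' with hle | ⟨s, hs, h1, h2, h3⟩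
      · exact Or.inl hle
      · exact Or.inr ⟨s, List.mem_cons_of_mem i hs, h1, h2, h3⟩
  | case3 i maxA h t rest hc ih =>
    intro hin hstk hmax
    have hgi : l.getD i 0 < l.getD t 0 := not_le.mp hc
    exact ih hin (pop_stkinv l t i rest hstk (fun _ => hgi))
      (pop_maxinv l t i rest maxA hin hstk (Or.inr hgi) hmax)
  | case4 i maxA h =>
    intro hin hstk hmax
    obtain ⟨h0, hub, hdel⟩ := hmax
    apply le_antisymm hub
    apply pvAlt_le l maxA h0
    intro j hj
    rcases hdel j (by omega) (by simp) with hle | ⟨s, hs, _⟩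
    · exact hle
    · simp at hs
  | case5 i maxA h t rest ih =>
    intro hin hstk hmax
    have hi : i = l.length := by omega
    exact ih hin (pop_stkinv l t i rest hstk (fun hlt => absurd hlt h))
      (pop_maxinv l t i rest maxA hin hstk (Or.inl hi) hmax)

-- ===== VERDICT (by name: the statement is the Claim_ definition above) =====
theorem maximum_histogram_area_spec : Claim_equal_maximum_histogram_area := by
  intro l _
  unfold Spec_maximum_histogram_area maximum_histogram_area
  apply pvLoopA_eq
  · omega
  · intro _ m hm; omega
  · exact ⟨le_refl 0, pvAlt_nonneg l, by omega⟩
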